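-- pv_equiv track=rewrite | github.com/nerfelitewar/Python-workspace | Python_Projects/jumble_cases.py | jumble
-- ===== SOURCE A (Python) =====
-- methods = str.upper, str.lower
--
-- def jumble(s):
--   r = []
--   n = 0
--   for i in s:
--     if not i.isalpha():
--       r.append(i)
--     else:
--       r.append(methods[n](i))
--       n = 1 if n == 0 else 0
--   return ''.join(r)
-- ===== SOURCE B (Python) =====
-- def jumble(s):
--     letters = [(c.upper() if k % 2 == 0 else c.lower())
--                for k, c in enumerate(c for c in s if c.isalpha())]
--     it = iter(letters)
--     return ''.join(next(it) if c.isalpha() else c for c in s)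
-- ===== Notes on version B (the rewrite author's own statement) =====
-- stated objective: alternative
-- what changed: Replaces the single stateful upper/lower toggle loop with a build-then-merge scheme: first compute the cased forms of the alphabetic characters by their parity in the letter-only subsequence, then a second pass over the original string splices them back in.
import Mathlib
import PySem

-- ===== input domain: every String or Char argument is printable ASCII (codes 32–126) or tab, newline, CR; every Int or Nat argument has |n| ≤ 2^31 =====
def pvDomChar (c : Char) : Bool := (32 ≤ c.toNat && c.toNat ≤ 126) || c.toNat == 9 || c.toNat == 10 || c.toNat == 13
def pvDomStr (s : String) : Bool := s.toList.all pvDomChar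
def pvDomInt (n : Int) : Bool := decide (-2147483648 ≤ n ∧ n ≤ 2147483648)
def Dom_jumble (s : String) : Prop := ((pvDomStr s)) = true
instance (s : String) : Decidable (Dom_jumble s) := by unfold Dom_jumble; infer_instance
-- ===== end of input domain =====

-- B alternates case on letters by a build-then-merge two-pass scheme instead of A's single
-- stateful toggle loop; same cost, different decomposition (objective: alternative).

-- ===== PORT A =====
-- the loop over s with toggle n, appending to r (methods[n] = upper if n == 0 else lower)
def jumbleGoA (n : Nat) : List Char → List Char
  | [] => []
  | i :: t =>
    if !(PySem.Chars.isalpha i) then i :: jumbleGoA n t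
    else (if n == 0 then PySem.Chars.upperChar i else PySem.Chars.lowerChar i) ::
      jumbleGoA (if n == 0 then 1 else 0) t

def jumble (s : String) : String := String.mk (jumbleGoA 0 s.toList)

-- ===== PORT B =====
-- pass 1: cased forms of the alphabetic characters, alternating by index parity
def jumbleLetters (l : List Char) : List Char :=
  (PySem.List.enumerate (l.filter PySem.Chars.isalpha)).map
    (fun p => if p.1 % 2 == 0 then PySem.Chars.upperChar p.2 else PySem.Chars.lowerChar p.2)

-- pass 2: splice the precomputed cased letters back into the original string
-- (an exhausted iterator would stop the generator, hence the [] case yields [])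
def jumbleMerge : List Char → List Char → List Char
  | [], _ => []
  | c :: cs, ls =>
    if PySem.Chars.isalpha c then
      match ls with
      | x :: xs => x :: jumbleMerge cs xs
      | [] => []
    else c :: jumbleMerge cs ls

def jumble_alt (s : String) : String :=
  String.mk (jumbleMerge s.toList (jumbleLetters s.toList))

-- ===== PRECONDITION & SPEC =====
def Spec_jumble (s : String) (out : String) : Prop := out = jumble_alt s
instance (s : String) (out : String) : Decidable (Spec_jumble s out) := by unfold Spec_jumble; infer_instance

-- ===== CLAIM (what is proved, stated in full; the proofs are below) =====
def Claim_equal_jumble : Prop := ∀ (s : String), Dom_jumble s → Spec_jumble s (jumble s)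

-- ===== LEMMAS AND PROOFS =====

-- proof helper: the cased letter list starting at toggle state n
def jumbleCas (n : Nat) : List Char → List Char
  | [] => []
  | c :: t => (if n == 0 then PySem.Chars.upperChar c else PySem.Chars.lowerChar c) ::
      jumbleCas (if n == 0 then 1 else 0) t

theorem jumbleLetters_eq_cas (l : List Char) (k : Int) (hk : 0 ≤ k) :
    (PySem.List.enumerate l k).map
      (fun p => if p.1 % 2 == 0 then PySem.Chars.upperChar p.2 else PySem.Chars.lowerChar p.2)
    = jumbleCas (if k % 2 == 0 then 0 else 1) l := by
  induction l generalizing k with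
  | nil => simp [PySem.List.enumerate_nil, jumbleCas]
  | cons c t ih =>
    rw [PySem.List.enumerate_cons, List.map_cons, ih (k + 1) (by omega)]
    have h2 : k % 2 = 0 ∨ k % 2 = 1 := by omega
    rcases h2 with h | h
    · have h' : (k + 1) % 2 = 1 := by omega
      simp [jumbleCas, h, h']
    · have h' : (k + 1) % 2 = 0 := by omega
      simp [jumbleCas, h, h']

theorem jumbleMerge_cas (l : List Char) (n : Nat) :
    jumbleMerge l (jumbleCas n (l.filter PySem.Chars.isalpha)) = jumbleGoA n l := by
  induction l generalizing n with
  | nil => simp [jumbleMerge, jumbleGoA]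
  | cons c t ih =>
    by_cases h : PySem.Chars.isalpha c = true
    · simp [jumbleMerge, jumbleGoA, h, List.filter_cons, jumbleCas, ih]
    · simp [jumbleMerge, jumbleGoA, h, List.filter_cons, ih]

-- ===== VERDICT (by name: the statement is the Claim_ definition above) =====
theorem jumble_spec : Claim_equal_jumble := by
  intro s _
  unfold Spec_jumble jumble jumble_alt jumbleLetters
  rw [jumbleLetters_eq_cas _ 0 (by norm_num)]
  norm_num
  rw [jumbleMerge_cas]
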